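-- pv_equiv track=rewrite | github.com/DavidMudiwa/real-estate-data-pipeline | scripts/sold_listing_update.py | get_company_logo
-- ===== SOURCE A (Python) =====
-- def get_company_logo(brand_relationship_lookup, field4, matched_company):
--     """
--     Gets the company logo from brand_relationship.csv based on Field4 (brandID) and company name.
--     Also checks the company document's logo field as a fallback.
--
--     Args:
--         brand_relationship_lookup: Lookup structure from create_brand_relationship_lookup
--         field4: The brandID value from the input record (Field4)
--         matched_company: The matched company object from companiesV3_test
--
--     Returns:
--         str: The logo URL or None if not found
--     """
--     # First, check if company document has a logo field
--     if matched_company and isinstance(matched_company, dict):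
--         company_logo = matched_company.get('logo')
--         if company_logo and str(company_logo).strip():
--             return str(company_logo).strip()
--
--     # Fall back to brand_relationship lookup
--     if not brand_relationship_lookup or not field4:
--         return None
--
--     brand_id = str(field4).strip()
--     if brand_id not in brand_relationship_lookup:
--         return None
--
--     relationships = brand_relationship_lookup[brand_id]
--
--     # Get company name from matched_company if available
--     company_name = None
--     if matched_company and isinstance(matched_company, dict):
--         company_name = matched_company.get('companyName', '')
--
--     # Try to find exact match first (brandID + companyName)
--     if company_name:
--         company_name_lower = company_name.lower().strip()
--         for rel in relationships:
--             rel_company_name = str(rel.get('companyName', '')).strip().lower()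
--             if rel_company_name == company_name_lower:
--                 logo = rel.get('logo', '').strip()
--                 if logo:
--                     return logo
--
--     # If no exact match, return any logo associated with this brandID
--     for rel in relationships:
--         logo = rel.get('logo', '').strip()
--         if logo:
--             return logo
--
--     return None
-- ===== SOURCE B (Python) =====
-- def get_company_logo(brand_relationship_lookup, field4, matched_company):
--     """Single-pass re-implementation: the exact-match scan and the any-logo
--     fallback scan are fused into one loop with a first_any accumulator."""
--     if matched_company:
--         logo = str(matched_company.get('logo') or '').strip()
--         if logo:
--             return logo
--     if not brand_relationship_lookup or not field4:
--         return None
--     relationships = brand_relationship_lookup.get(str(field4).strip())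
--     if relationships is None:
--         return None
--     target = None
--     if matched_company:
--         name = matched_company.get('companyName')
--         if name:
--             target = name.lower().strip()
--     first_any = None
--     for rel in relationships:
--         logo = str(rel.get('logo', '')).strip()
--         if not logo:
--             continue
--         if target is not None and str(rel.get('companyName', '')).strip().lower() == target:
--             return logo
--         if first_any is None:
--             first_any = logo
--     return first_any
-- ===== Notes on version B (the rewrite author's own statement) =====
-- stated objective: simpler
-- what changed: A's two sequential loops over the relationships (an exact companyName-match pass, then a separate any-logo fallback pass) are fused into a single scan that returns an exact match immediately and keeps the first non-empty logo in an accumulator as the fallback.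
import Mathlib
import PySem

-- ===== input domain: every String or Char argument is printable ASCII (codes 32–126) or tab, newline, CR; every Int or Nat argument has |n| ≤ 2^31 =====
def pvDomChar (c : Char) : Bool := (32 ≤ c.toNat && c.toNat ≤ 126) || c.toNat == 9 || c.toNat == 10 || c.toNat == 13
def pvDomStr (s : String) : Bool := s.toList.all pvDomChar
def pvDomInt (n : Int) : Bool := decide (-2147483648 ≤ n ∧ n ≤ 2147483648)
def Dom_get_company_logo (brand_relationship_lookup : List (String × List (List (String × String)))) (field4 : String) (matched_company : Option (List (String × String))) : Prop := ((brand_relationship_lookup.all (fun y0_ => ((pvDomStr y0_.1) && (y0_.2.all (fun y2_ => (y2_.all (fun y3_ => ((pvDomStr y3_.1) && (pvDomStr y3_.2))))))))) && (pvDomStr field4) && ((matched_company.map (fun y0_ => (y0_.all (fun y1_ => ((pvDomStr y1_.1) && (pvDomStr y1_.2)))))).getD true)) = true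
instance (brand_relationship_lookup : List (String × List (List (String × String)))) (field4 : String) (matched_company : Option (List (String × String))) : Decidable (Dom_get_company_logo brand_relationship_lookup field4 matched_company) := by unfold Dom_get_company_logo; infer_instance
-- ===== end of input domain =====

-- ===== PORT A =====
-- B fuses A's two sequential scans over the relationships into one scan with an accumulator; objective: simpler.
-- shared helper: dict.get on an association list (first match)
def dictGet (d : List (String × String)) (k : String) : Option String :=
  (d.find? (fun p => p.1 == k)).map (·.2)

-- A's first loop: exact companyName match with a non-empty stripped logo
def aExact (t : String) : List (List (String × String)) → Option String
  | [] => none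
  | rel :: rest =>
    let rname := PySem.Str.lower (PySem.Str.strip ((dictGet rel "companyName").getD ""))
    if rname = t then
      let logo := PySem.Str.strip ((dictGet rel "logo").getD "")
      if logo ≠ "" then some logo else aExact t rest
    else aExact t rest

-- A's second loop: first non-empty stripped logo
def aAny : List (List (String × String)) → Option String
  | [] => none
  | rel :: rest =>
    let logo := PySem.Str.strip ((dictGet rel "logo").getD "")
    if logo ≠ "" then some logo else aAny rest

def get_company_logo (brand_relationship_lookup : List (String × List (List (String × String)))) (field4 : String) (matched_company : Option (List (String × String))) : Option String :=
  let fromCompany : Option String :=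
    match matched_company with
    | none => none
    | some d =>
      if d.isEmpty then none
      else
        match dictGet d "logo" with
        | none => none
        | some cl => if cl ≠ "" ∧ PySem.Str.strip cl ≠ "" then some (PySem.Str.strip cl) else none
  match fromCompany with
  | some l => some l
  | none =>
    if brand_relationship_lookup = [] ∨ field4 = "" then none
    else
      let brand_id := PySem.Str.strip field4
      match (brand_relationship_lookup.find? (fun p => p.1 == brand_id)).map (·.2) with
      | none => none
      | some relationships =>
        let company_name : String :=
          match matched_company with
          | none => ""
          | some d => if d.isEmpty then "" else (dictGet d "companyName").getD ""
        match (if company_name ≠ "" then aExact (PySem.Str.strip (PySem.Str.lower company_name)) relationships else none) with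
        | some l => some l
        | none => aAny relationships

-- ===== PORT B =====
-- B's single fused scan: return immediately on an exact match, remember the first logo otherwise
def bScan (target : Option String) (firstAny : Option String) : List (List (String × String)) → Option String
  | [] => firstAny
  | rel :: rest =>
    let logo := PySem.Str.strip ((dictGet rel "logo").getD "")
    if logo = "" then bScan target firstAny rest
    else if some (PySem.Str.lower (PySem.Str.strip ((dictGet rel "companyName").getD ""))) = target then some logo
    else bScan target (firstAny.or (some logo)) rest

def get_company_logo_alt (brand_relationship_lookup : List (String × List (List (String × String)))) (field4 : String) (matched_company : Option (List (String × String))) : Option String :=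
  let topLogo : Option String :=
    match matched_company with
    | none => none
    | some d =>
      if d.isEmpty then none
      else
        let l := PySem.Str.strip ((dictGet d "logo").getD "")
        if l ≠ "" then some l else none
  match topLogo with
  | some l => some l
  | none =>
    if brand_relationship_lookup.isEmpty || field4 == "" then none
    else
      match brand_relationship_lookup.find? (fun p => p.1 == PySem.Str.strip field4) with
      | none => none
      | some (_, relationships) =>
        let target : Option String :=
          match matched_company with
          | none => none
          | some d =>
            if d.isEmpty then none
            else
              match dictGet d "companyName" with
              | none => none
              | some cn => if cn = "" then none else some (PySem.Str.strip (PySem.Str.lower cn))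
        bScan target none relationships

-- ===== PRECONDITION & SPEC =====
def Spec_get_company_logo (brand_relationship_lookup : List (String × List (List (String × String)))) (field4 : String) (matched_company : Option (List (String × String))) (out : Option String) : Prop := out = get_company_logo_alt brand_relationship_lookup field4 matched_company
instance (brand_relationship_lookup : List (String × List (List (String × String)))) (field4 : String) (matched_company : Option (List (String × String))) (out : Option String) : Decidable (Spec_get_company_logo brand_relationship_lookup field4 matched_company out) := by unfold Spec_get_company_logo; infer_instance

-- ===== CLAIM (what is proved, stated in full; the proofs are below) =====
def Claim_equal_get_company_logo : Prop := ∀ (brand_relationship_lookup : List (String × List (List (String × String)))) (field4 : String) (matched_company : Option (List (String × String))), Dom_get_company_logo brand_relationship_lookup field4 matched_company → Spec_get_company_logo brand_relationship_lookup field4 matched_company (get_company_logo brand_relationship_lookup field4 matched_company)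

-- ===== LEMMAS AND PROOFS =====
def exactOpt (target : Option String) (rels : List (List (String × String))) : Option String :=
  match target with
  | some t => aExact t rels
  | none => none

theorem bScan_eq (target : Option String) (acc : Option String) (rels : List (List (String × String))) :
    bScan target acc rels = (exactOpt target rels).or (acc.or (aAny rels)) := by
  induction rels generalizing acc with
  | nil =>
    cases target <;> simp [bScan, exactOpt, aExact, aAny]
  | cons rel rest ih =>
    simp only [bScan]
    by_cases hl : PySem.Str.strip ((dictGet rel "logo").getD "") = ""
    · simp only [hl, if_pos]
      rw [ih]
      cases target with
      | none => simp [exactOpt, aAny, hl]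
      | some t => simp [exactOpt, aExact, aAny, hl]
    · rw [if_neg hl]
      by_cases hm : some (PySem.Str.lower (PySem.Str.strip ((dictGet rel "companyName").getD ""))) = target
      · rw [if_pos hm]
        cases target with
        | none => simp at hm
        | some t =>
          simp only [Option.some.injEq] at hm
          simp [exactOpt, aExact, hm, hl]
      · rw [if_neg hm]
        rw [ih]
        have hany : aAny (rel :: rest) = some (PySem.Str.strip ((dictGet rel "logo").getD "")) := by
          simp [aAny, hl]
        have hex : exactOpt target (rel :: rest) = exactOpt target rest := by
          cases target with
          | none => simp [exactOpt]
          | some t =>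
            simp only [exactOpt, aExact]
            have hne : PySem.Str.lower (PySem.Str.strip ((dictGet rel "companyName").getD "")) ≠ t := by
              intro h; exact hm (by rw [h])
            simp [hne]
        have hacc : (acc.or (some (PySem.Str.strip ((dictGet rel "logo").getD "")))).or (aAny rest)
            = acc.or (some (PySem.Str.strip ((dictGet rel "logo").getD ""))) := by
          cases acc <;> simp
        rw [hany, hacc, hex]

-- ===== VERDICT (by name: the statement is the Claim_ definition above) =====
theorem get_company_logo_spec : Claim_equal_get_company_logo := by
  intro lookup field4 mc _
  unfold Spec_get_company_logo get_company_logo get_company_logo_alt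
  have hstrip0 : PySem.Str.strip "" = "" := by decide
  -- A's top-guard condition (cl ≠ "" ∧ strip cl ≠ "") collapses to B's (strip cl ≠ "")
  have htop : ∀ d : List (String × String),
      (match dictGet d "logo" with
        | none => (none : Option String)
        | some cl => if cl ≠ "" ∧ PySem.Str.strip cl ≠ "" then some (PySem.Str.strip cl) else none)
      = (if PySem.Str.strip ((dictGet d "logo").getD "") ≠ "" then
           some (PySem.Str.strip ((dictGet d "logo").getD "")) else none) := by
    intro d
    cases hgl : dictGet d "logo" with
    | none => simp [hstrip0]
    | some cl =>
      simp only [Option.getD_some]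
      by_cases hs : PySem.Str.strip cl = ""
      · simp [hs]
      · have hcl : cl ≠ "" := fun h => hs (h ▸ hstrip0)
        simp [hs, hcl]
  -- the guards agree
  have hg : (lookup.isEmpty || field4 == "") = true ↔ (lookup = [] ∨ field4 = "") := by
    cases lookup <;> simp
  -- A's two-phase tail equals B's fused scan
  have htail : ∀ (rels : List (List (String × String))) (target : Option String),
      (match exactOpt target rels with
        | some l => some l
        | none => aAny rels) = bScan target none rels := by
    intro rels target
    rw [bScan_eq]
    cases exactOpt target rels <;> simp
  -- the exact-match targets agree
  have htarget : ∀ (d : List (String × String)) (r : List (List (String × String))),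
      (if (dictGet d "companyName").getD "" ≠ "" then
         exactOpt (some (PySem.Str.strip (PySem.Str.lower ((dictGet d "companyName").getD "")))) r
       else none)
      = exactOpt (match dictGet d "companyName" with
          | none => none
          | some cn => if cn = "" then none else some (PySem.Str.strip (PySem.Str.lower cn))) r := by
    intro d r
    cases hcn : dictGet d "companyName" with
    | none => simp [exactOpt]
    | some cn =>
      by_cases h : cn = "" <;> simp [h, exactOpt]
  cases mc with
  | none =>
    simp only []
    by_cases hgd : lookup = [] ∨ field4 = ""
    · have hb : (lookup.isEmpty || field4 == "") = true := hg.mpr hgd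
      simp [hgd, hb]
    · have hb : (lookup.isEmpty || field4 == "") = false := by
        rcases h : (lookup.isEmpty || field4 == "") with _ | _
        · rfl
        · exact absurd (hg.mp h) hgd
      simp only [if_neg hgd, hb, Bool.false_eq_true, if_neg, ite_false]
      cases hf : lookup.find? (fun p => p.1 == PySem.Str.strip field4) with
      | none => simp
      | some pr =>
        simp only [Option.map_some]
        rw [← htail pr.2 none]
        simp [exactOpt]
  | some d =>
    by_cases hde : d.isEmpty
    · simp only [hde, if_pos, ite_true]
      by_cases hgd : lookup = [] ∨ field4 = ""
      · have hb : (lookup.isEmpty || field4 == "") = true := hg.mpr hgd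
        simp [hgd, hb]
      · have hb : (lookup.isEmpty || field4 == "") = false := by
          rcases h : (lookup.isEmpty || field4 == "") with _ | _
          · rfl
          · exact absurd (hg.mp h) hgd
        simp only [if_neg hgd, hb, Bool.false_eq_true, if_neg, ite_false]
        cases hf : lookup.find? (fun p => p.1 == PySem.Str.strip field4) with
        | none => simp
        | some pr =>
          simp only [Option.map_some]
          rw [← htail pr.2 none]
          simp [exactOpt]
    · simp only [hde, ite_false, if_neg, htop]
      by_cases hl : PySem.Str.strip ((dictGet d "logo").getD "") = ""
      · simp only [hl, ne_eq, not_true_eq_false, ite_false, if_neg]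
        by_cases hgd : lookup = [] ∨ field4 = ""
        · have hb : (lookup.isEmpty || field4 == "") = true := hg.mpr hgd
          simp [hgd, hb]
        · have hb : (lookup.isEmpty || field4 == "") = false := by
            rcases h : (lookup.isEmpty || field4 == "") with _ | _
            · rfl
            · exact absurd (hg.mp h) hgd
          simp only [if_neg hgd, hb, Bool.false_eq_true, if_neg, ite_false]
          cases hf : lookup.find? (fun p => p.1 == PySem.Str.strip field4) with
          | none => simp
          | some pr =>
            simp only [Option.map_some]
            rw [← htail pr.2]
            rw [show (if (dictGet d "companyName").getD "" ≠ "" then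
                  aExact (PySem.Str.strip (PySem.Str.lower ((dictGet d "companyName").getD ""))) pr.2
                else none)
              = (if (dictGet d "companyName").getD "" ≠ "" then
                  exactOpt (some (PySem.Str.strip (PySem.Str.lower ((dictGet d "companyName").getD "")))) pr.2
                else none) from by simp [exactOpt]]
            rw [htarget d pr.2]
      · simp [hl]
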